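-- pv_equiv track=rewrite | github.com/terminator3576/CryptiX | avalanche.py | calculate_weights
-- ===== SOURCE A (Python) =====
-- def calculate_weights(binary):
--     n = len(binary)
--     local_weights = [0] * n  # Initialize the weights list with zeros
--
--     for i in range(n):
--         if binary[i] == '1':
--             weight = 1
--             if i > 0 and binary[i-1] == '1':
--                 weight += 1
--             if i < n - 1 and binary[i+1] == '1':
--                 weight += 1
--             local_weights[i] = weight
--     return local_weights
-- ===== SOURCE B (Python) =====
-- def calculate_weights(binary):
--     n = len(binary)
--     # prefix-sum table: P[k] = number of '1' characters in binary[0:k]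
--     P = [0] * (n + 1)
--     for k in range(n):
--         P[k + 1] = P[k] + (1 if binary[k] == '1' else 0)
--     res = []
--     for i in range(n):
--         if binary[i] == '1':
--             res.append(P[min(i + 1, n - 1) + 1] - P[max(i - 1, 0)])
--         else:
--             res.append(0)
--     return res
-- ===== Notes on version B (the rewrite author's own statement) =====
-- stated objective: alternative
-- what changed: Replaces per-index neighbor checks with a prefix-sum table of set-bit counts, computing each set bit's weight as a clamped window difference P[min(i+1,n-1)+1]-P[max(i-1,0)].
import Mathlib
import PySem

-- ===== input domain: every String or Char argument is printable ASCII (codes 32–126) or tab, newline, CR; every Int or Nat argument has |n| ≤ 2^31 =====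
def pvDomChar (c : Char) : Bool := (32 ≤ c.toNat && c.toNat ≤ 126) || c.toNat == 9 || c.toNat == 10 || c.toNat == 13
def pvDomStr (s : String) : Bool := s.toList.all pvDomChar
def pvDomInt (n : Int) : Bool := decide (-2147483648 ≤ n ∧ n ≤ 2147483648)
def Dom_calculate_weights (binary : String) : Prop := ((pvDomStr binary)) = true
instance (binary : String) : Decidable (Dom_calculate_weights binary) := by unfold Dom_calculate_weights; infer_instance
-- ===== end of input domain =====

-- B replaces per-index neighbor checks with a prefix-sum table of set-bit counts and a
-- clamped window difference per set bit (objective: alternative decomposition, same cost).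


-- ===== PORT A =====
-- binary[i] with i always in range(n) is ported as cs.getD i ' ' (index provably in range).
def calculate_weights (binary : String) : List Int :=
  let cs := binary.toList
  let n := cs.length
  (List.range n).foldl (fun lw i =>
    if cs.getD i ' ' = '1' then
      let weight : Int := 1
      let weight := if 0 < i ∧ cs.getD (i - 1) ' ' = '1' then weight + 1 else weight
      let weight := if i < n - 1 ∧ cs.getD (i + 1) ' ' = '1' then weight + 1 else weight
      lw.set i weight
    else lw) (List.replicate n (0 : Int))

-- ===== PORT B =====
-- B fills P[k+1] := P[k] + d k left to right; ported as building the table front-to-back.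
def calculate_weights_alt (binary : String) : List Int :=
  let cs := binary.toList
  let n := cs.length
  let P := (List.range n).foldl (fun P k =>
      P ++ [P.getD k 0 + (if cs.getD k ' ' = '1' then (1 : Int) else 0)]) [(0 : Int)]
  (List.range n).foldl (fun res i =>
    res ++ [if cs.getD i ' ' = '1' then
              P.getD (min (i + 1) (n - 1) + 1) 0 - P.getD (max (i - 1) 0) 0
            else 0]) []

-- ===== PRECONDITION & SPEC =====
def Spec_calculate_weights (binary : String) (out : List Int) : Prop := out = calculate_weights_alt binary
instance (binary : String) (out : List Int) : Decidable (Spec_calculate_weights binary out) := by unfold Spec_calculate_weights; infer_instance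

-- ===== CLAIM (what is proved, stated in full; the proofs are below) =====
def Claim_equal_calculate_weights : Prop := ∀ (binary : String), Dom_calculate_weights binary → Spec_calculate_weights binary (calculate_weights binary)

-- ===== LEMMAS AND PROOFS =====

-- indicator of a '1' at position k
def pvD (cs : List Char) (k : Nat) : Int := if cs.getD k ' ' = '1' then 1 else 0

-- prefix sum: number of '1's among positions 0..k-1
def pvS (cs : List Char) (k : Nat) : Int := ((List.range k).map (pvD cs)).sum

lemma pvS_succ (cs : List Char) (k : Nat) : pvS cs (k + 1) = pvS cs k + pvD cs k := by
  simp [pvS, List.range_succ]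

-- A's weight expression at a set bit
def pvW (cs : List Char) (n i : Nat) : Int :=
  (if i < n - 1 ∧ cs.getD (i + 1) ' ' = '1' then
    (if 0 < i ∧ cs.getD (i - 1) ' ' = '1' then (1 : Int) + 1 else 1) + 1
   else (if 0 < i ∧ cs.getD (i - 1) ' ' = '1' then (1 : Int) + 1 else 1))

-- invariant of A's set-in-place loop
lemma foldl_set_inv (n : Nat) (c : Nat → Prop) [DecidablePred c] (f : Nat → Int) :
    ∀ m, m ≤ n →
      (List.range m).foldl (fun lw i => if c i then lw.set i (f i) else lw)
        (List.replicate n (0 : Int))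
      = (List.range n).map (fun i => if i < m ∧ c i then f i else 0) := by
  intro m
  induction m with
  | zero =>
    intro _
    apply List.ext_getElem <;> simp
  | succ m ih =>
    intro h
    rw [List.range_succ, List.foldl_append, ih (by omega)]
    simp only [List.foldl_cons, List.foldl_nil]
    by_cases hc : c m
    · rw [if_pos hc]
      apply List.ext_getElem
      · simp
      · intro j hj hj'
        simp only [List.getElem_set, List.getElem_map, List.getElem_range]
        simp only [List.length_map, List.length_range] at hj'
        by_cases hjm : m = j
        · subst hjm; simp [hc]
        · rw [if_neg hjm]
          have : (j < m ∧ c j) ↔ (j < m + 1 ∧ c j) := by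
            constructor
            · rintro ⟨h1, h2⟩; exact ⟨by omega, h2⟩
            · rintro ⟨h1, h2⟩; exact ⟨by omega, h2⟩
          simp [this]
    · rw [if_neg hc]
      apply List.map_congr_left
      intro i hi
      by_cases him : i = m
      · subst him; simp [hc]
      · have : (i < m ∧ c i) ↔ (i < m + 1 ∧ c i) := by
          constructor
          · rintro ⟨h1, h2⟩; exact ⟨by omega, h2⟩
          · rintro ⟨h1, h2⟩; exact ⟨by omega, h2⟩
        simp [this]

-- B's table-building loop yields exactly the prefix sums
lemma foldl_prefix (cs : List Char) :
    ∀ m, (List.range m).foldl (fun P k =>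
        P ++ [P.getD k 0 + (if cs.getD k ' ' = '1' then (1 : Int) else 0)]) [(0 : Int)]
      = (List.range (m + 1)).map (pvS cs) := by
  intro m
  induction m with
  | zero => simp [pvS]
  | succ m ih =>
    rw [List.range_succ, List.foldl_append, ih]
    simp only [List.foldl_cons, List.foldl_nil]
    have hget : ((List.range (m + 1)).map (pvS cs)).getD m 0 = pvS cs m := by
      rw [List.getD_eq_getElem _ _ (by simp)]
      simp
    rw [hget, List.range_succ (n := m + 1), List.map_append]
    simp [pvS_succ, pvD]

lemma getD_map_range_pvS (cs : List Char) (m k : Nat) (h : k < m) :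
    ((List.range m).map (pvS cs)).getD k 0 = pvS cs k := by
  rw [List.getD_eq_getElem _ _ (by simp [h])]
  simp

-- pointwise agreement of the two bodies
lemma point (cs : List Char) (i : Nat) (h : i < cs.length) :
    (if i < cs.length ∧ cs.getD i ' ' = '1' then pvW cs cs.length i else 0)
    = (if cs.getD i ' ' = '1' then
        pvS cs (min (i + 1) (cs.length - 1) + 1) - pvS cs (max (i - 1) 0)
       else 0) := by
  set n := cs.length with hn
  by_cases hc : cs.getD i ' ' = '1'
  · rw [if_pos ⟨h, hc⟩, if_pos hc]
    simp only [List.getD_eq_getElem?_getD] at hc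
    have hmax : max (i - 1) 0 = i - 1 := by omega
    rw [hmax]
    by_cases hi0 : i = 0
    · subst hi0
      by_cases h1 : n = 1
      · have hmin : min (0 + 1) (n - 1) = 0 := by omega
        rw [hmin]
        simp [pvW, pvS, pvD, List.range_succ, h1, hc]
      · have hmin : min (0 + 1) (n - 1) = 1 := by omega
        rw [hmin]
        simp only [pvW, pvS_succ, pvD]
        have hlt : 0 < n - 1 := by omega
        simp [pvS, hlt]
        split_ifs <;> simp_all
    · obtain ⟨j, rfl⟩ : ∃ j, i = j + 1 := ⟨i - 1, by omega⟩
      by_cases hlast : j + 1 + 1 ≥ n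
      · have hmin : min (j + 1 + 1) (n - 1) = j + 1 := by omega
        rw [hmin]
        have hnot : ¬ (j + 1 < n - 1) := by omega
        simp only [pvW, pvS_succ, pvD]
        simp [hnot]
        split_ifs <;> simp_all
        omega
      · have hmin : min (j + 1 + 1) (n - 1) = j + 1 + 1 := by omega
        rw [hmin]
        have hlt : j + 1 < n - 1 := by omega
        simp only [pvW, pvS_succ, pvD]
        simp only [Nat.add_sub_cancel]
        split_ifs <;> simp_all <;> omega
  · rw [if_neg (fun hh => hc hh.2), if_neg hc]

-- A's port in closed form
lemma A_char (binary : String) :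
    calculate_weights binary
    = (List.range binary.toList.length).map
        (fun i => if i < binary.toList.length ∧ binary.toList.getD i ' ' = '1'
                  then pvW binary.toList binary.toList.length i else 0) := by
  show (List.range binary.toList.length).foldl _ _ = _
  exact foldl_set_inv binary.toList.length
      (fun i => binary.toList.getD i ' ' = '1') (pvW binary.toList binary.toList.length)
      binary.toList.length (le_refl _)

-- B's port in closed form
lemma B_char (binary : String) :
    calculate_weights_alt binary
    = (List.range binary.toList.length).map
        (fun i => if binary.toList.getD i ' ' = '1' then
            pvS binary.toList (min (i + 1) (binary.toList.length - 1) + 1)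
              - pvS binary.toList (max (i - 1) 0)
          else 0) := by
  show (List.range binary.toList.length).foldl _ [] = _
  rw [foldl_prefix binary.toList binary.toList.length]
  rw [PySem.List.foldl_append_singleton_eq_map]
  apply List.map_congr_left
  intro i hi
  rw [List.mem_range] at hi
  by_cases hc : binary.toList.getD i ' ' = '1'
  · rw [if_pos hc, if_pos hc,
      getD_map_range_pvS _ _ _ (by omega),
      getD_map_range_pvS _ _ _ (by omega)]
  · rw [if_neg hc, if_neg hc]

-- ===== VERDICT (by name: the statement is the Claim_ definition above) =====
theorem calculate_weights_spec : Claim_equal_calculate_weights := by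
  intro binary _
  show calculate_weights binary = calculate_weights_alt binary
  rw [A_char, B_char]
  apply List.map_congr_left
  intro i hi
  rw [List.mem_range] at hi
  exact point binary.toList i hi
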